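-- pv_equiv track=rewrite | github.com/tanakaderoy/Projects | Projects/flipXY.py | flip2
-- ===== SOURCE A (Python) =====
-- def flip2(text):
--     size = len(text)
--     xList = [0] * (size+1)
--     yList = [0] * (size+1)
--
--     for i in range(size):
--         if text[i] == "y":
--             yList[i+1] = yList[i] + 1
--         else:
--             yList[i+1] = yList[i]
--     for i in range(size-1,-1,-1):
--         if text[i] == "x":
--             xList[i] = xList[i + 1] + 1
--         else:
--             xList[i] = xList[i +1]
--
--     best = len(xList)
--
--     for i in range(len(xList)):
--         sumPair = xList[i] + yList[i]
--         if sumPair < best: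
--             best = sumPair
--     return (best)
-- ===== SOURCE B (Python) =====
-- def flip2(text):
--     best = 0
--     count_y = 0
--     for ch in text:
--         if ch == "y":
--             count_y += 1
--         elif ch == "x":
--             best = min(best + 1, count_y)
--     return best
-- ===== Notes on version B (the rewrite author's own statement) =====
-- stated objective: simpler
-- what changed: Replaced the two size+1 prefix/suffix count arrays plus a separate minimizing scan by a single forward online-DP pass keeping two integers (best, count_y).
import Mathlib
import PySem

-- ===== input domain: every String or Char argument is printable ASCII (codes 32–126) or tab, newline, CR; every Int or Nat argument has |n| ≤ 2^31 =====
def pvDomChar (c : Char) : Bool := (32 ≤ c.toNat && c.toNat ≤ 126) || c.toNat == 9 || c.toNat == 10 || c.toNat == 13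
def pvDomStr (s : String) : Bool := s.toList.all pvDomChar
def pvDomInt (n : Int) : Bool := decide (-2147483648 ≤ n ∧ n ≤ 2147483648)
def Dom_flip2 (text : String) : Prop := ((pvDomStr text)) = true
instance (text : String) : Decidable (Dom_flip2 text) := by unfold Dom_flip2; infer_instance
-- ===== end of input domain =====

-- B replaces A's two prefix/suffix count arrays and minimizing scan with one
-- forward pass keeping two integers (objective: simpler, O(1) extra space).

-- ===== PORT A =====
-- Literal transliteration of A: build yList (prefix 'y' counts) forward,
-- xList (suffix 'x' counts) backward over range(size-1,-1,-1) (= reverse of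
-- range(size)), then scan for the minimal xList[i]+yList[i].
-- All indices are in range, so text[i] is l.getD i ' ' (exact here).
def flip2 (text : String) : Int :=
  let l := text.toList
  let size := l.length
  let xList0 : List Int := List.replicate (size + 1) 0
  let yList0 : List Int := List.replicate (size + 1) 0
  let yList := (List.range size).foldl (fun y i =>
      if l.getD i ' ' = 'y' then y.set (i + 1) (y.getD i 0 + 1)
      else y.set (i + 1) (y.getD i 0)) yList0
  let xList := ((List.range size).reverse).foldl (fun x i =>
      if l.getD i ' ' = 'x' then x.set i (x.getD (i + 1) 0 + 1)
      else x.set i (x.getD (i + 1) 0)) xList0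
  let best0 : Int := (xList.length : Int)
  (List.range xList.length).foldl (fun best i =>
      let sumPair := xList.getD i 0 + yList.getD i 0
      if sumPair < best then sumPair else best) best0

-- ===== PORT B =====
-- Literal transliteration of B: one pass, state (best, count_y).
def flip2_alt (text : String) : Int :=
  (text.toList.foldl (fun (s : Int × Int) c =>
      if c = 'y' then (s.1, s.2 + 1)
      else if c = 'x' then (min (s.1 + 1) s.2, s.2)
      else s) (0, 0)).1

-- ===== PRECONDITION & SPEC =====
def Spec_flip2 (text : String) (out : Int) : Prop := out = flip2_alt text
instance (text : String) (out : Int) : Decidable (Spec_flip2 text out) := by unfold Spec_flip2; infer_instance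

-- ===== CLAIM (what is proved, stated in full; the proofs are below) =====
def Claim_equal_flip2 : Prop := ∀ (text : String), Dom_flip2 text → Spec_flip2 text (flip2 text)

-- ===== LEMMAS AND PROOFS =====

-- number of 'y' (resp. 'x') characters, as an Int
def cY (l : List Char) : Int := ((l.filter (fun c => c = 'y')).length : Int)
def cX (l : List Char) : Int := ((l.filter (fun c => c = 'x')).length : Int)

-- cost of splitting l at position i: flip the 'x's after i and the 'y's before i
def tcost (l : List Char) (i : Nat) : Int := cX (l.drop i) + cY (l.take i)

def mins (L : List Int) (a : Int) : Int := L.foldl min a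

-- the common value both programs compute
def ANS (l : List Char) : Int :=
  mins ((List.range (l.length + 1)).map (tcost l)) ((l.length : Int) + 1)

theorem cY_append (p q : List Char) : cY (p ++ q) = cY p + cY q := by
  simp [cY, List.filter_append]

theorem cX_append (p q : List Char) : cX (p ++ q) = cX p + cX q := by
  simp [cX, List.filter_append]

theorem cY_single (c : Char) : cY [c] = if c = 'y' then 1 else 0 := by
  by_cases h : c = 'y' <;> simp [cY, h]

theorem cX_single (c : Char) : cX [c] = if c = 'x' then 1 else 0 := by
  by_cases h : c = 'x' <;> simp [cX, h]

theorem cY_le_len (l : List Char) : cY l ≤ (l.length : Int) := by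
  simp only [cY]
  exact_mod_cast List.length_filter_le _ _

theorem cX_le_len (l : List Char) : cX l ≤ (l.length : Int) := by
  simp only [cX]
  exact_mod_cast List.length_filter_le _ _

theorem tcost_le (l : List Char) (i : Nat) (hi : i ≤ l.length) :
    tcost l i ≤ (l.length : Int) := by
  have h1 := cX_le_len (l.drop i)
  have h2 := cY_le_len (l.take i)
  simp only [List.length_drop, List.length_take] at h1 h2
  unfold tcost
  omega

theorem mins_append_single (L : List Int) (a x : Int) :
    mins (L ++ [x]) a = min (mins L a) x := by
  simp [mins, List.foldl_append]

theorem mins_map_add (L : List Int) (a d : Int) :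
    mins (L.map (· + d)) (a + d) = mins L a + d := by
  induction L generalizing a with
  | nil => simp [mins]
  | cons c L ih =>
      simp only [List.map_cons, mins, List.foldl_cons] at *
      rw [show min (a + d) (c + d) = min a c + d from min_add_add_right a c d]
      exact ih (min a c)

theorem mins_absorb (L : List Int) : ∀ (a x : Int), x ∈ L → mins L (min a x) = mins L a := by
  induction L with
  | nil => intro a x hx; cases hx
  | cons c L ih =>
      intro a x hx
      simp only [mins, List.foldl_cons]
      rcases List.mem_cons.mp hx with h | h
      · subst h
        rw [min_assoc, min_self]
      · rw [show min (min a x) c = min (min a c) x by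
          rw [min_assoc, min_comm x c, ← min_assoc]]
        exact ih (min a c) x h

theorem mins_le_init (L : List Int) (a : Int) : mins L a ≤ a := by
  induction L generalizing a with
  | nil => simp [mins]
  | cons c L ih =>
      simp only [mins, List.foldl_cons] at *
      exact le_trans (ih (min a c)) (min_le_left a c)

theorem mins_le_mem (L : List Int) : ∀ (a x : Int), x ∈ L → mins L a ≤ x := by
  induction L with
  | nil => intro a x hx; cases hx
  | cons c L ih =>
      intro a x hx
      simp only [mins, List.foldl_cons]
      rcases List.mem_cons.mp hx with h | h
      · subst h
        exact le_trans (mins_le_init L (min a x)) (min_le_right a x)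
      · exact ih (min a c) x h

-- ANS is at most the all-'y'-flipped split (i = length)
theorem ANS_le_cY (l : List Char) : ANS l ≤ cY l := by
  have hmem : tcost l l.length ∈ (List.range (l.length + 1)).map (tcost l) := by
    exact List.mem_map.mpr ⟨l.length, List.mem_range.mpr (Nat.lt_succ_self _), rfl⟩
  have h := mins_le_mem _ ((l.length : Int) + 1) _ hmem
  have ht : tcost l l.length = cY l := by
    simp [tcost, List.drop_length, List.take_length, cX]
  rw [ht] at h
  exact h

-- snoc recurrence for ANS
theorem ANS_snoc (p : List Char) (c : Char) :
    ANS (p ++ [c]) =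
      if c = 'y' then ANS p
      else if c = 'x' then min (ANS p + 1) (cY p)
      else min (ANS p) (cY p) := by
  have hlen : (p ++ [c]).length = p.length + 1 := by simp
  have hmap : (List.range (p.length + 1)).map (tcost (p ++ [c])) =
      (List.range (p.length + 1)).map
        (fun i => tcost p i + (if c = 'x' then 1 else 0)) := by
    apply List.map_congr_left
    intro i hi
    have hi' : i ≤ p.length := Nat.lt_succ_iff.mp (List.mem_range.mp hi)
    have htake : (p ++ [c]).take i = p.take i := List.take_append_of_le_length hi'
    have hdrop : (p ++ [c]).drop i = p.drop i ++ [c] := List.drop_append_of_le_length hi'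
    simp [tcost, htake, hdrop, cX_append, cX_single]
    by_cases h : c = 'x' <;> simp [h] <;> ring
  have hlast : tcost (p ++ [c]) (p.length + 1) = cY p + (if c = 'y' then 1 else 0) := by
    have h1 : (p ++ [c]).take (p.length + 1) = p ++ [c] := by
      rw [← hlen]; exact List.take_length
    have h2 : (p ++ [c]).drop (p.length + 1) = [] := by
      rw [← hlen]; exact List.drop_length
    rw [tcost, h1, h2, cY_append, cY_single]
    simp [cX]
  have hrange : List.range ((p ++ [c]).length + 1) =
      List.range (p.length + 1) ++ [p.length + 1] := by
    rw [hlen, List.range_succ]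
  have h0mem : tcost p 0 ∈ (List.range (p.length + 1)).map (tcost p) :=
    List.mem_map.mpr ⟨0, List.mem_range.mpr (Nat.succ_pos _), rfl⟩
  have h0le : tcost p 0 ≤ (p.length : Int) := tcost_le p 0 (Nat.zero_le _)
  -- absorb the larger initial accumulator into the (nonempty) list
  have hinit : ∀ b : Int, (p.length : Int) + 1 ≤ b →
      mins ((List.range (p.length + 1)).map (tcost p)) b
        = mins ((List.range (p.length + 1)).map (tcost p)) ((p.length : Int) + 1) := by
    intro b hb
    have h1 := mins_absorb ((List.range (p.length + 1)).map (tcost p)) b (tcost p 0) h0mem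
    have h2 := mins_absorb ((List.range (p.length + 1)).map (tcost p))
        ((p.length : Int) + 1) (tcost p 0) h0mem
    have e1 : min b (tcost p 0) = tcost p 0 := min_eq_right (by omega)
    have e2 : min ((p.length : Int) + 1) (tcost p 0) = tcost p 0 := min_eq_right (by omega)
    rw [e1] at h1; rw [e2] at h2
    rw [← h1, ← h2]
  unfold ANS
  rw [hrange, List.map_append, List.map_cons, List.map_nil, mins_append_single, hlast, hlen, hmap]
  push_cast
  by_cases hx : c = 'x'
  · have hy : ¬ c = 'y' := by simp [hx]
    simp only [hx, if_true]
    have := mins_map_add ((List.range (p.length + 1)).map (tcost p)) ((p.length : Int) + 1) 1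
    rw [List.map_map] at this
    have hcomp : ((fun x => x + 1) ∘ tcost p) = (fun i => tcost p i + 1) := rfl
    rw [hcomp] at this
    rw [show (p.length : Int) + 1 + 1 = ((p.length : Int) + 1) + 1 by ring] at this
    rw [this]
    simp [add_zero]
  · have hsimp : (fun i => tcost p i + (if c = 'x' then 1 else 0)) = tcost p := by
      funext i; simp [hx]
    have hle : ANS p ≤ cY p := ANS_le_cY p
    rw [show ANS p = mins ((List.range (p.length + 1)).map (tcost p)) ((p.length : Int) + 1)
      from rfl] at hle
    by_cases hy : c = 'y'
    · simp only [hy] at hsimp ⊢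
      rw [hsimp, hinit ((p.length : Int) + 1 + 1) (by omega), if_pos trivial, if_pos trivial]
      exact min_eq_left (by omega)
    · simp only [hx, hy, if_false]
      rw [show (fun i => tcost p i + (0 : Int)) = tcost p from by funext i; ring,
          hinit ((p.length : Int) + 1 + 1) (by omega), add_zero]

def stepB (s : Int × Int) (c : Char) : Int × Int :=
  if c = 'y' then (s.1, s.2 + 1)
  else if c = 'x' then (min (s.1 + 1) s.2, s.2)
  else s

-- B's fold computes (ANS, count of 'y')
theorem foldB_eq (l : List Char) :
    l.foldl stepB (0, 0) = (ANS l, cY l) := by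
  induction l using List.reverseRecOn with
  | nil => simp [ANS, mins, tcost, cY, cX, min_def]
  | append_singleton p c ih =>
      rw [List.foldl_append, ih, List.foldl_cons, List.foldl_nil, ANS_snoc,
          cY_append, cY_single]
      unfold stepB
      by_cases hy : c = 'y'
      · simp [hy]
      · by_cases hx : c = 'x'
        · have : ¬ c = 'y' := hy
          simp [hx, this]
        · have habs : min (ANS p) (cY p) = ANS p := min_eq_left (ANS_le_cY p)
          simp [hx, hy, habs]

-- ===== characterization of A's arrays =====

def stepY (l : List Char) (y : List Int) (i : Nat) : List Int :=
  if l.getD i ' ' = 'y' then y.set (i + 1) (y.getD i 0 + 1)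
  else y.set (i + 1) (y.getD i 0)

def stepX (l : List Char) (x : List Int) (i : Nat) : List Int :=
  if l.getD i ' ' = 'x' then x.set i (x.getD (i + 1) 0 + 1)
  else x.set i (x.getD (i + 1) 0)

theorem getD_set_self (L : List Int) (j : Nat) (v : Int) (hj : j < L.length) :
    (L.set j v).getD j 0 = v := by
  simp [List.getD, List.getElem?_set_self, hj]

theorem getD_set_ne (L : List Int) (i j : Nat) (v : Int) (hij : i ≠ j) :
    (L.set j v).getD i 0 = L.getD i 0 := by
  simp [List.getD, List.getElem?_set_ne (Ne.symm hij)]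

theorem take_snoc (l : List Char) (k : Nat) (hk : k < l.length) :
    l.take (k + 1) = l.take k ++ [l.getD k ' '] := by
  rw [List.take_succ]
  simp [List.getElem?_eq_getElem hk, List.getD, List.getD_eq_getElem l ' ' hk]

theorem drop_cons (l : List Char) (k : Nat) (hk : k < l.length) :
    l.drop k = l.getD k ' ' :: l.drop (k + 1) := by
  rw [List.getD_eq_getElem l ' ' hk]
  exact List.drop_eq_getElem_cons hk

theorem yLoop_char (l : List Char) (k : Nat) (hk : k ≤ l.length) (s : List Int)
    (hlen : s.length = l.length + 1) (h0 : s.getD 0 0 = 0) :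
    let r := (List.range k).foldl (stepY l) s
    r.length = l.length + 1 ∧
    (∀ i, i ≤ k → r.getD i 0 = cY (l.take i)) ∧
    (∀ i, k < i → r.getD i 0 = s.getD i 0) := by
  induction k with
  | zero =>
      refine ⟨hlen, ?_, fun i _ => rfl⟩
      intro i hi
      interval_cases i
      simpa [cY] using h0
  | succ k ih =>
      have hk' : k ≤ l.length := Nat.le_of_succ_le hk
      obtain ⟨rlen, rval, rrest⟩ := ih hk'
      set r := (List.range k).foldl (stepY l) s with hr
      have hkl : k < l.length := hk
      have hstep : (List.range (k + 1)).foldl (stepY l) s = stepY l r k := by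
        rw [List.range_succ, List.foldl_append, List.foldl_cons, List.foldl_nil, ← hr]
      have hk1 : k + 1 < r.length := by omega
      have hgetk : r.getD k 0 = cY (l.take k) := rval k (le_refl k)
      have hval : (stepY l r k).getD (k + 1) 0 = cY (l.take (k + 1)) := by
        rw [take_snoc l k hkl, cY_append, cY_single]
        unfold stepY
        by_cases h : l.getD k ' ' = 'y'
        · rw [if_pos h, getD_set_self r (k + 1) _ hk1, hgetk, if_pos h]
        · rw [if_neg h, getD_set_self r (k + 1) _ hk1, hgetk, if_neg h, add_zero]
      have hlen' : (stepY l r k).length = l.length + 1 := by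
        unfold stepY; split <;> simp [rlen]
      have hne : ∀ i, i ≠ k + 1 → (stepY l r k).getD i 0 = r.getD i 0 := by
        intro i hi
        unfold stepY
        split <;> rw [getD_set_ne r i (k + 1) _ hi]
      rw [hstep]
      refine ⟨hlen', ?_, ?_⟩
      · intro i hi
        by_cases hik : i = k + 1
        · rw [hik]; exact hval
        · rw [hne i hik]; exact rval i (by omega)
      · intro i hi
        rw [hne i (by omega)]
        exact rrest i (by omega)

theorem xLoop_char (l : List Char) (k : Nat) (hk : k ≤ l.length) (s : List Int)
    (hlen : s.length = l.length + 1)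
    (hs : ∀ i, k ≤ i → i ≤ l.length → s.getD i 0 = cX (l.drop i)) :
    let r := ((List.range k).reverse).foldl (stepX l) s
    r.length = l.length + 1 ∧ ∀ i, i ≤ l.length → r.getD i 0 = cX (l.drop i) := by
  induction k generalizing s with
  | zero =>
      exact ⟨hlen, fun i hi => hs i (Nat.zero_le i) hi⟩
  | succ k ih =>
      have hkl : k < l.length := hk
      have hstep : ((List.range (k + 1)).reverse).foldl (stepX l) s =
          ((List.range k).reverse).foldl (stepX l) (stepX l s k) := by
        rw [List.range_succ, List.reverse_append, List.reverse_singleton]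
        rfl
      have hklt : k < s.length := by omega
      have hgetk1 : s.getD (k + 1) 0 = cX (l.drop (k + 1)) :=
        hs (k + 1) (le_refl _) (by omega)
      have hlen' : (stepX l s k).length = l.length + 1 := by
        unfold stepX; split <;> simp [hlen]
      have hs' : ∀ i, k ≤ i → i ≤ l.length → (stepX l s k).getD i 0 = cX (l.drop i) := by
        intro i hki hil
        by_cases hik : i = k
        · subst hik
          rw [drop_cons l i hkl,
              show (l.getD i ' ' :: l.drop (i + 1)) = [l.getD i ' '] ++ l.drop (i + 1) from rfl,
              cX_append, cX_single]
          unfold stepX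
          by_cases h : l.getD i ' ' = 'x'
          · rw [if_pos h, getD_set_self s i _ hklt, hgetk1, if_pos h]; ring
          · rw [if_neg h, getD_set_self s i _ hklt, hgetk1, if_neg h]; ring
        · have hkeep : (stepX l s k).getD i 0 = s.getD i 0 := by
            unfold stepX
            split <;> rw [getD_set_ne s i k _ hik]
          rw [hkeep]
          exact hs i (by omega) hil
      rw [hstep]
      exact ih (by omega) (stepX l s k) hlen' hs'

-- ===== VERDICT (by name: the statement is the Claim_ definition above) =====
theorem flip2_spec : Claim_equal_flip2 := by
  intro text _
  unfold Spec_flip2 flip2 flip2_alt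
  rw [show (fun (s : Int × Int) c =>
      if c = 'y' then (s.1, s.2 + 1)
      else if c = 'x' then (min (s.1 + 1) s.2, s.2)
      else s) = stepB from rfl, foldB_eq]
  set l := text.toList with hl
  obtain ⟨ylen, yval, -⟩ := yLoop_char l l.length (le_refl _)
    (List.replicate (l.length + 1) 0) (by simp) (by simp [List.getD])
  obtain ⟨xlen, xval⟩ := xLoop_char l l.length (le_refl _)
    (List.replicate (l.length + 1) 0) (by simp)
    (by
      intro i hi hil
      have : i = l.length := le_antisymm hil hi
      subst this
      simp [List.getD, List.getElem?_replicate, Nat.lt_succ_self, cX])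
  set yL := (List.range l.length).foldl (stepY l) (List.replicate (l.length + 1) 0) with hy
  set xL := ((List.range l.length).reverse).foldl (stepX l) (List.replicate (l.length + 1) 0) with hx
  simp only [← hy, ← hx] at *
  rw [show ((List.range l.length).foldl (fun y i =>
        if l.getD i ' ' = 'y' then y.set (i + 1) (y.getD i 0 + 1)
        else y.set (i + 1) (y.getD i 0)) (List.replicate (l.length + 1) 0)) = yL from rfl]
  rw [show (((List.range l.length).reverse).foldl (fun x i =>
        if l.getD i ' ' = 'x' then x.set i (x.getD (i + 1) 0 + 1)
        else x.set i (x.getD (i + 1) 0)) (List.replicate (l.length + 1) 0)) = xL from rfl]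
  rw [xlen]
  have hcong : (List.range (l.length + 1)).foldl (fun best i =>
        let sumPair := xL.getD i 0 + yL.getD i 0
        if sumPair < best then sumPair else best) ((l.length : Int) + 1)
      = (List.range (l.length + 1)).foldl (fun best i => min best (tcost l i))
        ((l.length : Int) + 1) := by
    apply PySem.List.foldl_congr_mem
    intro acc i hi
    have hi' : i ≤ l.length := Nat.lt_succ_iff.mp (List.mem_range.mp hi)
    have hxv := xval i hi'
    have hyv := yval i hi'
    simp only [hxv, hyv]
    rw [show cX (l.drop i) + cY (l.take i) = tcost l i from rfl]
    rw [min_def]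
    by_cases h : tcost l i < acc
    · rw [if_pos h, if_neg (by omega)]
    · rw [if_neg h, if_pos (by omega)]
  have hfold : ∀ (L : List Nat) (a : Int),
      L.foldl (fun best i => min best (tcost l i)) a = mins (L.map (tcost l)) a := by
    intro L
    induction L with
    | nil => intro a; rfl
    | cons c L ih => intro a; simp [mins, List.foldl_cons, List.map_cons] at *; exact ih _
  push_cast
  rw [hcong, hfold]
  rfl
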